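-- pv_equiv track=rewrite | github.com/habunnywy/algorithm_item | leetcode/迷宫是否有出口.py | can_exit
-- ===== SOURCE A (Python) =====
-- dx = [0, 0, -1, 1]
--
-- dy = [-1, 1, 0, 0]
--
-- def can_exit(maze):
--     n = len(maze)
--
--     # 初始化访问矩阵
--     visited = [[False]*len(row) for row in maze]
--
--     # 深度优先搜索函数
--     def dfs(x, y):
--         # 当到达最后一行时，表示小人走出了地图
--         if x == n - 1:
--             return True
--
--         visited[x][y] = True  # 标记当前位置已访问
--
--         # 遍历四个方向
--         for i in range(4):
--             nx, ny = x + dx[i], y + dy[i]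
--
--             # 检查新位置是否在地图内，是否是墙，以及是否已经访问过
--             if 0 <= nx < n and 0 <= ny < len(maze[nx]) and maze[nx][ny] == '0' and not visited[nx][ny]:
--                 if dfs(nx, ny):
--                     return True
--
--         return False
--
--     # 从每一列开始进行搜索
--     for y in range(len(maze[0])):
--         if maze[0][y] == '0':
--             if dfs(0, y):
--                 return 1
--
--     return -1
-- ===== SOURCE B (Python) =====
-- def can_exit(maze):
--     n = len(maze)
--     visited = [[False] * len(row) for row in maze]
--     queue = []
--     for y in range(len(maze[0])):
--         if maze[0][y] == '0':
--             visited[0][y] = True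
--             queue.append((0, y))
--     i = 0
--     while i < len(queue):
--         x, y = queue[i]
--         i += 1
--         if x == n - 1:
--             return 1
--         for nx, ny in ((x, y - 1), (x, y + 1), (x - 1, y), (x + 1, y)):
--             if 0 <= nx < n and 0 <= ny < len(maze[nx]) and maze[nx][ny] == '0' and not visited[nx][ny]:
--                 visited[nx][ny] = True
--                 queue.append((nx, ny))
--     return -1
-- ===== Notes on version B (the rewrite author's own statement) =====
-- stated objective: alternative
-- what changed: Replaces A's recursive depth-first search (shared visited matrix, one dfs per open top-row cell) by a single iterative multi-source breadth-first search over an explicit FIFO queue seeded with all open top-row cells, marking cells when they are enqueued.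
import Mathlib
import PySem

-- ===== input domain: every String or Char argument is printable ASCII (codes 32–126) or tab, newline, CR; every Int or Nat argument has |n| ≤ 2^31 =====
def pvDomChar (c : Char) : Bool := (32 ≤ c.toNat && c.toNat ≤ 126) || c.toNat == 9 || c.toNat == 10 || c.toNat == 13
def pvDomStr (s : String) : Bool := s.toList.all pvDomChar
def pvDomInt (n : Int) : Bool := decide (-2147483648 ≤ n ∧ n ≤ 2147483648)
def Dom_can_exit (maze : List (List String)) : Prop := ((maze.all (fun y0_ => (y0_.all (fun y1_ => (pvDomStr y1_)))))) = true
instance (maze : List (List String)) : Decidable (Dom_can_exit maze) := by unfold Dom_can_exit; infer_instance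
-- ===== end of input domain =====

-- B replaces A's recursive depth-first search by an iterative multi-source breadth-first
-- search over an explicit FIFO queue (marking cells when enqueued); same return value.

-- ===== PORT A =====
def pvDx : List Int := [0, 0, -1, 1]
def pvDy : List Int := [-1, 1, 0, 0]

/-- `maze[x]` (guarded in A, default never used on admitted calls). -/
def pvRow (maze : List (List String)) (x : Int) : List String :=
  (PySem.List.pyGet? maze x).getD []

/-- `maze[x][y]` (guarded). -/
def pvCell (maze : List (List String)) (x y : Int) : String :=
  (PySem.List.pyGet? (pvRow maze x) y).getD ""

/-- `visited[x][y]` (guarded). -/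
def pvVGet (v : List (List Bool)) (x y : Int) : Bool :=
  (PySem.List.pyGet? ((PySem.List.pyGet? v x).getD []) y).getD false

/-- `visited[x][y] = True` (all call sites have 0 ≤ x, 0 ≤ y). -/
def pvVSet (v : List (List Bool)) (x y : Int) : List (List Bool) :=
  v.set x.toNat ((v.getD x.toNat []).set y.toNat true)

/-- number of `False` entries of the visited matrix (fuel bound only). -/
def pvCF (v : List (List Bool)) : Nat := (v.map (fun r => r.count false)).sum

/-- the condition `0 <= nx < n and 0 <= ny < len(maze[nx]) and maze[nx][ny] == '0'`. -/
def pvOpen (maze : List (List String)) (x y : Int) : Bool :=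
  decide (0 ≤ x) && decide (x < (maze.length : Int)) &&
  decide (0 ≤ y) && decide (y < ((pvRow maze x).length : Int)) &&
  (pvCell maze x y == "0")

/-- the full guard of A's inner `if` (and of B's): in bounds, open, not yet visited. -/
def pvGuard (maze : List (List String)) (v : List (List Bool)) (x y : Int) : Bool :=
  pvOpen maze x y && !(pvVGet v x y)

mutual
/-- A's `dfs`; the fuel only makes the recursion structural, it is never exhausted
    when called with fuel ≥ pvCF (pvVSet v x y) + 1. -/
def pvDfs (maze : List (List String)) : Nat → Int → Int → List (List Bool) →
    Bool × List (List Bool)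
  | 0, _, _, v => (false, v)
  | f + 1, x, y, v =>
    if x = (maze.length : Int) - 1 then (true, v)
    else pvDfsLoop maze f (pvDx.zip pvDy) x y (pvVSet v x y)
termination_by f _ _ _ => (f, 0)

/-- A's `for i in range(4)` loop inside `dfs`. -/
def pvDfsLoop (maze : List (List String)) : Nat → List (Int × Int) → Int → Int →
    List (List Bool) → Bool × List (List Bool)
  | _, [], _, _, v => (false, v)
  | f, d :: ds, x, y, v =>
    if pvGuard maze v (x + d.1) (y + d.2) then
      let r := pvDfs maze f (x + d.1) (y + d.2) v
      if r.1 then (true, r.2) else pvDfsLoop maze f ds x y r.2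
    else pvDfsLoop maze f ds x y v
termination_by f ds _ _ _ => (f, ds.length + 1)
end

/-- A's outer `for y in range(len(maze[0]))` loop. -/
def pvCanExitLoop (maze : List (List String)) (f : Nat) : List Int → List (List Bool) → Int
  | [], _ => -1
  | y :: ys, v =>
    if pvCell maze 0 y == "0" then
      let r := pvDfs maze f 0 y v
      if r.1 then 1 else pvCanExitLoop maze f ys r.2
    else pvCanExitLoop maze f ys v

def can_exit (maze : List (List String)) : Int :=
  let v0 := maze.map (fun row => List.replicate row.length false)
  pvCanExitLoop maze (pvCF v0 + 1)
    (PySem.List.pyRange 0 (((pvRow maze 0).length : Int)) 1) v0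

-- ===== PORT B =====
/-- the four neighbours `(x, y-1), (x, y+1), (x-1, y), (x+1, y)` of B's inner loop. -/
def pvNbrs (x y : Int) : List (Int × Int) := [(x, y - 1), (x, y + 1), (x - 1, y), (x + 1, y)]

/-- B's inner `for nx, ny in …` loop: mark and append each admissible neighbour. -/
def pvExpand (maze : List (List String)) : List (Int × Int) → List (List Bool) →
    List (Int × Int) → List (List Bool) × List (Int × Int)
  | [], v, q => (v, q)
  | p :: ps, v, q =>
    if pvGuard maze v p.1 p.2 then
      pvExpand maze ps (pvVSet v p.1 p.2) (q ++ [p])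
    else pvExpand maze ps v q

/-- B's seeding loop over `range(len(maze[0]))`. -/
def pvSeed (maze : List (List String)) : List Int → List (List Bool) →
    List (Int × Int) → List (List Bool) × List (Int × Int)
  | [], v, q => (v, q)
  | y :: ys, v, q =>
    if pvCell maze 0 y == "0" then
      pvSeed maze ys (pvVSet v 0 y) (q ++ [(0, y)])
    else pvSeed maze ys v q

/-- B's `while i < len(queue)` loop: the unprocessed part of the queue is the list
    argument; the fuel only makes it structural (never exhausted when
    fuel ≥ pvCF v + queue.length). -/
def pvBfs (maze : List (List String)) : Nat → List (Int × Int) → List (List Bool) → Int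
  | _, [], _ => -1
  | 0, _ :: _, _ => -1
  | f + 1, p :: rest, v =>
    if p.1 = (maze.length : Int) - 1 then 1
    else
      let r := pvExpand maze (pvNbrs p.1 p.2) v []
      pvBfs maze f (rest ++ r.2) r.1

def can_exit_alt (maze : List (List String)) : Int :=
  let v0 := maze.map (fun row => List.replicate row.length false)
  let s := pvSeed maze (PySem.List.pyRange 0 (((pvRow maze 0).length : Int)) 1) v0 []
  pvBfs maze (pvCF s.1 + s.2.length + 1) s.2 s.1

-- ===== PRECONDITION & SPEC =====
-- Pre_ excludes only the empty maze, on which both A and B raise IndexError at `maze[0]`.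
def Pre_can_exit (maze : List (List String)) : Prop := maze ≠ []
instance (maze : List (List String)) : Decidable (Pre_can_exit maze) := by
  unfold Pre_can_exit; infer_instance

def pvWitness_can_exit : List (List String) := [["0", "1"], ["1", "0"]]

def Spec_can_exit (maze : List (List String)) (out : Int) : Prop := out = can_exit_alt maze
instance (maze : List (List String)) (out : Int) : Decidable (Spec_can_exit maze out) := by
  unfold Spec_can_exit; infer_instance

-- ===== CLAIM (what is proved, stated in full; the proofs are below) =====
def Claim_equal_can_exit : Prop := ∀ (maze : List (List String)),
  Dom_can_exit maze → Pre_can_exit maze → Spec_can_exit maze (can_exit maze)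

-- ===== LEMMAS AND PROOFS =====

-- Abstract notions used only by the proofs.

/-- `p` is marked in the visited matrix (with nonnegative coordinates). -/
def pvV (v : List (List Bool)) (p : Int × Int) : Prop :=
  0 ≤ p.1 ∧ 0 ≤ p.2 ∧ pvVGet v p.1 p.2 = true

/-- the visited matrix only grows. -/
def pvSub (v w : List (List Bool)) : Prop := ∀ p, pvV v p → pvV w p

/-- visited matrix has the row lengths of the maze. -/
def pvShape (maze : List (List String)) (v : List (List Bool)) : Prop :=
  v.length = maze.length ∧ ∀ i : Nat, (v.getD i []).length = (maze.getD i []).length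

/-- reachability through open cells, every cell after the start avoiding `A`. -/
inductive pvReach (maze : List (List String)) (A : Int × Int → Prop) :
    Int × Int → Int × Int → Prop
  | refl (p) : pvReach maze A p p
  | step {p q r} : pvReach maze A p q → r ∈ pvNbrs q.1 q.2 →
      pvOpen maze r.1 r.2 = true → ¬ A r → pvReach maze A p r

def pvReachTop (maze : List (List String)) (p : Int × Int) : Prop :=
  ∃ y : Int, pvOpen maze 0 y = true ∧ pvReach maze (fun _ => False) (0, y) p

/-- some open top-row cell reaches the bottom row through open cells. -/
def pvHasPath (maze : List (List String)) : Prop :=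
  ∃ q : Int × Int, pvReachTop maze q ∧ q.1 = (maze.length : Int) - 1

/-- every visited cell is open and not on the bottom row. -/
def pvNB (maze : List (List String)) (v : List (List Bool)) : Prop :=
  ∀ p, pvV v p → pvOpen maze p.1 p.2 = true ∧ p.1 ≠ (maze.length : Int) - 1

/-- the DFS invariant: no visited cell outside `G` reaches the bottom row by a path
    whose later cells avoid visited ∪ G. -/
def pvInv (maze : List (List String)) (v : List (List Bool)) (G : Int × Int → Prop) : Prop :=
  ∀ p, pvV v p → ¬ G p → ∀ q, pvReach maze (fun c => pvV v c ∨ G c) p q →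
    q.1 ≠ (maze.length : Int) - 1

-- ---- low-level lemmas on the matrix primitives ----

theorem pvVGet_nonneg (v : List (List Bool)) (x y : Int) (hx : 0 ≤ x) (hy : 0 ≤ y) :
    pvVGet v x y = ((v.getD x.toNat []).getD y.toNat false) := by
  unfold pvVGet
  rw [PySem.List.pyGet?_of_nonneg _ hx, PySem.List.pyGet?_of_nonneg _ hy]
  simp [List.getD_eq_getElem?_getD]

theorem pvVGet_init (maze : List (List String)) (x y : Int) :
    pvVGet (maze.map fun r => List.replicate r.length false) x y = false := by
  unfold pvVGet
  cases h1 : PySem.List.pyGet? (maze.map fun r => List.replicate r.length false) x with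
  | none =>
    simp only [Option.getD_none]
    cases h2 : PySem.List.pyGet? ([] : List Bool) y with
    | none => simp
    | some b => exact absurd (PySem.List.mem_of_pyGet?_eq_some _ h2) (by simp)
  | some row =>
    simp only [Option.getD_some]
    have hrow := PySem.List.mem_of_pyGet?_eq_some _ h1
    obtain ⟨r, _, hrr⟩ := List.mem_map.mp hrow
    cases h2 : PySem.List.pyGet? row y with
    | none => simp
    | some b =>
      have hb := PySem.List.mem_of_pyGet?_eq_some _ h2
      rw [← hrr] at hb
      have := List.eq_of_mem_replicate hb
      simp [this]

theorem pvShape_init (maze : List (List String)) :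
    pvShape maze (maze.map fun r => List.replicate r.length false) := by
  constructor
  · simp
  · intro i
    rw [List.getD_eq_getElem?_getD, List.getD_eq_getElem?_getD, List.getElem?_map]
    cases h : maze[i]? <;> simp

theorem pv_getD_set {α : Type} (l : List α) (i j : Nat) (a d : α) :
    (l.set i a).getD j d = if i = j ∧ i < l.length then a else l.getD j d := by
  rw [List.getD_eq_getElem?_getD, List.getD_eq_getElem?_getD, List.getElem?_set]
  by_cases h : i = j
  · subst h
    by_cases h2 : i < l.length <;> simp [h2]
  · simp [h]

theorem pvShape_vset (maze : List (List String)) (v : List (List Bool)) (x y : Int)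
    (h : pvShape maze v) : pvShape maze (pvVSet v x y) := by
  obtain ⟨h1, h2⟩ := h
  constructor
  · simpa [pvVSet] using h1
  · intro i
    unfold pvVSet
    rw [pv_getD_set]
    by_cases hc : x.toNat = i ∧ x.toNat < v.length
    · rw [if_pos hc, List.length_set, ← hc.1]
      exact h2 x.toNat
    · rw [if_neg hc]
      exact h2 i

theorem pvRow_nonneg (maze : List (List String)) (x : Int) (hx : 0 ≤ x) :
    pvRow maze x = maze.getD x.toNat [] := by
  unfold pvRow
  rw [PySem.List.pyGet?_of_nonneg _ hx]
  simp [List.getD_eq_getElem?_getD]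

theorem pvOpen_iff (maze : List (List String)) (x y : Int) :
    pvOpen maze x y = true ↔ 0 ≤ x ∧ x < (maze.length : Int) ∧ 0 ≤ y ∧
      y < ((pvRow maze x).length : Int) ∧ pvCell maze x y = "0" := by
  simp [pvOpen, and_assoc]

theorem pvGuard_iff (maze : List (List String)) (v : List (List Bool)) (x y : Int) :
    pvGuard maze v x y = true ↔ pvOpen maze x y = true ∧ pvVGet v x y = false := by
  simp [pvGuard]

theorem pvShape_bounds (maze : List (List String)) (v : List (List Bool)) (x y : Int)
    (hs : pvShape maze v) (ho : pvOpen maze x y = true) :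
    x.toNat < v.length ∧ y.toNat < (v.getD x.toNat []).length := by
  obtain ⟨hx, hxl, hy, hyl, _⟩ := (pvOpen_iff maze x y).mp ho
  obtain ⟨h1, h2⟩ := hs
  rw [pvRow_nonneg maze x hx] at hyl
  constructor
  · omega
  · rw [h2 x.toNat]
    omega

/-- master characterisation of reading after a write (nonnegative coordinates). -/
theorem pvVGet_vset (v : List (List Bool)) (x y a b : Int)
    (hx : 0 ≤ x) (hy : 0 ≤ y) (ha : 0 ≤ a) (hb : 0 ≤ b) :
    pvVGet (pvVSet v x y) a b = true ↔
      (pvVGet v a b = true ∨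
        (a = x ∧ b = y ∧ x.toNat < v.length ∧ y.toNat < (v.getD x.toNat []).length)) := by
  rw [pvVGet_nonneg _ a b ha hb, pvVGet_nonneg v a b ha hb]
  unfold pvVSet
  rw [pv_getD_set]
  by_cases h1 : x.toNat = a.toNat ∧ x.toNat < v.length
  · rw [if_pos h1, pv_getD_set]
    have hax : a.toNat = x.toNat := h1.1.symm
    by_cases h2 : y.toNat = b.toNat ∧ y.toNat < (v.getD x.toNat []).length
    · rw [if_pos h2]
      exact iff_of_true rfl (Or.inr ⟨by omega, by omega, h1.2, h2.2⟩)
    · rw [if_neg h2, hax]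
      constructor
      · exact Or.inl
      · rintro (h | ⟨rfl, rfl, _, hb2⟩)
        · exact h
        · exact absurd ⟨rfl, hb2⟩ h2
  · rw [if_neg h1]
    constructor
    · exact Or.inl
    · rintro (h | ⟨rfl, rfl, hbx, _⟩)
      · exact h
      · exact absurd ⟨rfl, hbx⟩ h1

theorem pvV_vset_iff (v : List (List Bool)) (x y : Int) (hx : 0 ≤ x) (hy : 0 ≤ y)
    (hbx : x.toNat < v.length) (hby : y.toNat < (v.getD x.toNat []).length) (p : Int × Int) :
    pvV (pvVSet v x y) p ↔ (pvV v p ∨ p = (x, y)) := by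
  unfold pvV
  constructor
  · rintro ⟨h1, h2, h3⟩
    rcases (pvVGet_vset v x y p.1 p.2 hx hy h1 h2).mp h3 with h | ⟨ha, hb2, _, _⟩
    · exact Or.inl ⟨h1, h2, h⟩
    · exact Or.inr (Prod.ext ha hb2)
  · rintro (⟨h1, h2, h3⟩ | rfl)
    · exact ⟨h1, h2, (pvVGet_vset v x y p.1 p.2 hx hy h1 h2).mpr (Or.inl h3)⟩
    · exact ⟨hx, hy, (pvVGet_vset v x y x y hx hy hx hy).mpr (Or.inr ⟨rfl, rfl, hbx, hby⟩)⟩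

theorem pvSub_vset (v : List (List Bool)) (x y : Int) (hx : 0 ≤ x) (hy : 0 ≤ y) :
    pvSub v (pvVSet v x y) := by
  rintro p ⟨h1, h2, h3⟩
  exact ⟨h1, h2, (pvVGet_vset v x y p.1 p.2 hx hy h1 h2).mpr (Or.inl h3)⟩

theorem pvV_vset_self (v : List (List Bool)) (x y : Int) (hx : 0 ≤ x) (hy : 0 ≤ y)
    (hbx : x.toNat < v.length) (hby : y.toNat < (v.getD x.toNat []).length) :
    pvV (pvVSet v x y) (x, y) :=
  ⟨hx, hy, (pvVGet_vset v x y x y hx hy hx hy).mpr (Or.inr ⟨rfl, rfl, hbx, hby⟩)⟩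

theorem pv_count_set_le (r : List Bool) : ∀ j : Nat,
    (r.set j true).count false ≤ r.count false := by
  induction r with
  | nil => intro j; simp
  | cons a t ih =>
    intro j
    cases j with
    | zero => cases a <;> simp
    | succ j =>
      simp only [List.set, List.count_cons]
      have := ih j
      omega

theorem pv_count_set_eq (r : List Bool) : ∀ j : Nat, j < r.length →
    r.getD j false = false → (r.set j true).count false + 1 = r.count false := by
  induction r with
  | nil => intro j h; simp at h
  | cons a t ih =>
    intro j hj hf
    cases j with
    | zero =>
      simp only [List.getD_cons_zero] at hf
      subst hf
      simp
    | succ j =>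
      simp only [List.getD_cons_succ] at hf
      simp only [List.set, List.count_cons]
      have := ih j (by simpa using hj) hf
      omega

theorem pvCF_cons (r : List Bool) (t : List (List Bool)) :
    pvCF (r :: t) = r.count false + pvCF t := by
  simp [pvCF]

theorem pvCF_set_le : ∀ (v : List (List Bool)) (i j : Nat),
    pvCF (v.set i ((v.getD i []).set j true)) ≤ pvCF v := by
  intro v
  induction v with
  | nil => intro i j; simp [pvCF]
  | cons r t ih =>
    intro i j
    cases i with
    | zero =>
      simp only [List.getD_cons_zero, List.set]
      rw [pvCF_cons, pvCF_cons]
      have := pv_count_set_le r j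
      omega
    | succ i =>
      simp only [List.getD_cons_succ, List.set]
      rw [pvCF_cons, pvCF_cons]
      have := ih i j
      omega

theorem pvCF_set_eq : ∀ (v : List (List Bool)) (i j : Nat), i < v.length →
    j < (v.getD i []).length → (v.getD i []).getD j false = false →
    pvCF (v.set i ((v.getD i []).set j true)) + 1 = pvCF v := by
  intro v
  induction v with
  | nil => intro i j h; simp at h
  | cons r t ih =>
    intro i j hi hj hf
    cases i with
    | zero =>
      simp only [List.getD_cons_zero] at hj hf ⊢
      simp only [List.set]
      rw [pvCF_cons, pvCF_cons]
      have := pv_count_set_eq r j hj hf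
      omega
    | succ i =>
      simp only [List.getD_cons_succ] at hj hf ⊢
      simp only [List.set]
      rw [pvCF_cons, pvCF_cons]
      have := ih i j (by simpa using hi) hj hf
      omega

theorem pvCF_vset_le (v : List (List Bool)) (x y : Int) :
    pvCF (pvVSet v x y) ≤ pvCF v := pvCF_set_le v x.toNat y.toNat

theorem pvCF_vset_eq (v : List (List Bool)) (x y : Int) (hx : 0 ≤ x) (hy : 0 ≤ y)
    (hbx : x.toNat < v.length) (hby : y.toNat < (v.getD x.toNat []).length)
    (hun : pvVGet v x y = false) : pvCF (pvVSet v x y) + 1 = pvCF v := by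
  rw [pvVGet_nonneg v x y hx hy] at hun
  exact pvCF_set_eq v x.toNat y.toNat hbx hby hun

theorem pvSub_refl (v : List (List Bool)) : pvSub v v := fun _ h => h
theorem pvSub_trans {u v w : List (List Bool)} (h1 : pvSub u v) (h2 : pvSub v w) :
    pvSub u w := fun p h => h2 p (h1 p h)

theorem pvNbrs_eq_map (x y : Int) :
    (pvDx.zip pvDy).map (fun d => (x + d.1, y + d.2)) = pvNbrs x y := by
  have hz : pvDx.zip pvDy = [((0 : Int), (-1 : Int)), (0, 1), (-1, 0), (1, 0)] := rfl
  rw [hz]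
  simp [pvNbrs, sub_eq_add_neg]

-- ---- reachability lemmas ----

theorem pvReach_anti {maze : List (List String)} {A A' : Int × Int → Prop}
    (h : ∀ c, A c → A' c) {p q : Int × Int} (hr : pvReach maze A' p q) :
    pvReach maze A p q := by
  induction hr with
  | refl => exact pvReach.refl _
  | step h1 hnbr hopen hA ih => exact pvReach.step ih hnbr hopen (fun hc => hA (h _ hc))

theorem pvReach_trans {maze : List (List String)} {A : Int × Int → Prop} {p q r : Int × Int}
    (h1 : pvReach maze A p q) (h2 : pvReach maze A q r) : pvReach maze A p r := by
  induction h2 with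
  | refl => exact h1
  | step h hnbr hopen hA ih => exact pvReach.step ih hnbr hopen hA

theorem pvReach_in_V {maze : List (List String)} {v : List (List Bool)}
    (hcl : ∀ p, pvV v p → ∀ r ∈ pvNbrs p.1 p.2, pvOpen maze r.1 r.2 = true → pvV v r)
    {p q : Int × Int} (hr : pvReach maze (fun _ => False) p q) (hp : pvV v p) : pvV v q := by
  induction hr with
  | refl => exact hp
  | step h hnbr hopen _ ih => exact hcl _ ih _ hnbr hopen

theorem pvReach_cover {maze : List (List String)} {v : List (List Bool)} {p q : Int × Int}
    (hr : pvReach maze (fun _ => False) p q) (hp : pvV v p) :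
    pvV v q ∨ ∃ s, pvV v s ∧ pvReach maze (fun c => pvV v c ∨ False) s q := by
  induction hr with
  | refl => exact Or.inl hp
  | @step q' r' h hnbr hopen _ ih =>
    by_cases hvr : pvV v r'
    · exact Or.inl hvr
    · rcases ih with hq | ⟨s, hs, hra⟩
      · exact Or.inr ⟨q', hq, pvReach.step (pvReach.refl q') hnbr hopen (by simp [hvr])⟩
      · exact Or.inr ⟨s, hs, pvReach.step hra hnbr hopen (by simp [hvr])⟩

/-- with the invariant at `G = ∅`, visited cells reach no bottom-row cell at all. -/
theorem pvBlocked {maze : List (List String)} {v : List (List Bool)}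
    (hinv : pvInv maze v (fun _ => False)) (hnb : pvNB maze v) {p q : Int × Int}
    (hp : pvV v p) (hr : pvReach maze (fun _ => False) p q) :
    q.1 ≠ (maze.length : Int) - 1 := by
  rcases pvReach_cover hr hp with hq | ⟨s, hs, hra⟩
  · exact (hnb q hq).2
  · exact hinv s hs (fun h => h) q hra

-- ---- DFS (port A) lemmas ----

theorem pvDfs_zero (maze : List (List String)) (x y : Int) (v : List (List Bool)) :
    pvDfs maze 0 x y v = (false, v) := by
  rw [pvDfs]

theorem pvDfs_succ (maze : List (List String)) (f : Nat) (x y : Int) (v : List (List Bool)) :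
    pvDfs maze (f + 1) x y v =
      if x = (maze.length : Int) - 1 then (true, v)
      else pvDfsLoop maze f (pvDx.zip pvDy) x y (pvVSet v x y) := by
  rw [pvDfs]

theorem pvDfsLoop_nil (maze : List (List String)) (f : Nat) (x y : Int)
    (v : List (List Bool)) : pvDfsLoop maze f [] x y v = (false, v) := by
  rw [pvDfsLoop]

theorem pvDfsLoop_cons (maze : List (List String)) (f : Nat) (d : Int × Int)
    (ds : List (Int × Int)) (x y : Int) (v : List (List Bool)) :
    pvDfsLoop maze f (d :: ds) x y v =
      if pvGuard maze v (x + d.1) (y + d.2) then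
        (if (pvDfs maze f (x + d.1) (y + d.2) v).1 then
          (true, (pvDfs maze f (x + d.1) (y + d.2) v).2)
        else pvDfsLoop maze f ds x y (pvDfs maze f (x + d.1) (y + d.2) v).2)
      else pvDfsLoop maze f ds x y v := by
  rw [pvDfsLoop]

/-- the inductive statement for `pvDfs` at fuel `f` (completeness / invariant shape). -/
def pvDfsStmtK (maze : List (List String)) (f : Nat) : Prop :=
  ∀ x y v (G : Int × Int → Prop), pvShape maze v → pvNB maze v → pvInv maze v G →
    pvOpen maze x y = true → pvCF (pvVSet v x y) + 1 ≤ f →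
    (pvDfs maze f x y v).1 = false →
    pvShape maze (pvDfs maze f x y v).2 ∧ pvNB maze (pvDfs maze f x y v).2 ∧
    pvSub v (pvDfs maze f x y v).2 ∧ pvCF (pvDfs maze f x y v).2 ≤ pvCF (pvVSet v x y) ∧
    pvV (pvDfs maze f x y v).2 (x, y) ∧ pvInv maze (pvDfs maze f x y v).2 G

theorem pvDfsLoopK (maze : List (List String)) (f : Nat) (hK : pvDfsStmtK maze f) :
    ∀ (ds : List (Int × Int)) (x y : Int) (v : List (List Bool)) (G : Int × Int → Prop)
      (C : Nat), pvShape maze v → pvNB maze v →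
      pvInv maze v (fun c => G c ∨ c = (x, y)) → pvCF v ≤ C → C ≤ f →
      (pvDfsLoop maze f ds x y v).1 = false →
      pvShape maze (pvDfsLoop maze f ds x y v).2 ∧ pvNB maze (pvDfsLoop maze f ds x y v).2 ∧
      pvSub v (pvDfsLoop maze f ds x y v).2 ∧
      pvCF (pvDfsLoop maze f ds x y v).2 ≤ pvCF v ∧
      pvInv maze (pvDfsLoop maze f ds x y v).2 (fun c => G c ∨ c = (x, y)) ∧
      (∀ d ∈ ds, pvOpen maze (x + d.1) (y + d.2) = true →
        pvV (pvDfsLoop maze f ds x y v).2 (x + d.1, y + d.2)) := by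
  intro ds
  induction ds with
  | nil =>
    intro x y v G C hs hnb hinv hcf hCf hfalse
    rw [pvDfsLoop_nil]
    exact ⟨hs, hnb, pvSub_refl v, le_refl _, hinv, by simp⟩
  | cons d ds ih =>
    intro x y v G C hs hnb hinv hcf hCf hfalse
    rw [pvDfsLoop_cons] at hfalse ⊢
    by_cases hg : pvGuard maze v (x + d.1) (y + d.2) = true
    · rw [if_pos hg] at hfalse ⊢
      obtain ⟨ho, hu⟩ := (pvGuard_iff maze v _ _).mp hg
      obtain ⟨hnx, _, hny, _, _⟩ := (pvOpen_iff maze _ _).mp ho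
      obtain ⟨hbx, hby⟩ := pvShape_bounds maze v _ _ hs ho
      by_cases hb1 : (pvDfs maze f (x + d.1) (y + d.2) v).1 = true
      · rw [if_pos hb1] at hfalse; simp at hfalse
      · rw [if_neg hb1] at hfalse ⊢
        have hfalse' : (pvDfs maze f (x + d.1) (y + d.2) v).1 = false := by
          simpa using hb1
        have hcfv : pvCF (pvVSet v (x + d.1) (y + d.2)) + 1 = pvCF v :=
          pvCF_vset_eq v _ _ hnx hny hbx hby hu
        have hK1 := hK (x + d.1) (y + d.2) v (fun c => G c ∨ c = (x, y)) hs hnb hinv ho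
          (by omega) hfalse'
        obtain ⟨hs1, hnb1, hsub1, hcf1, hV1, hinv1⟩ := hK1
        have ih1 := ih x y (pvDfs maze f (x + d.1) (y + d.2) v).2 G C hs1 hnb1 hinv1
          (by omega) hCf hfalse
        obtain ⟨hs2, hnb2, hsub2, hcf2, hinv2, hcov2⟩ := ih1
        refine ⟨hs2, hnb2, pvSub_trans hsub1 hsub2, by omega, hinv2, ?_⟩
        intro d' hd' ho'
        rcases List.mem_cons.mp hd' with rfl | hd'
        · exact hsub2 _ hV1
        · exact hcov2 d' hd' ho'
    · rw [if_neg hg] at hfalse ⊢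
      have ih1 := ih x y v G C hs hnb hinv hcf hCf hfalse
      obtain ⟨hs2, hnb2, hsub2, hcf2, hinv2, hcov2⟩ := ih1
      refine ⟨hs2, hnb2, hsub2, hcf2, hinv2, ?_⟩
      intro d' hd' ho'
      rcases List.mem_cons.mp hd' with rfl | hd'
      · have hget : pvVGet v (x + d'.1) (y + d'.2) = true := by
          rcases Bool.eq_false_or_eq_true (pvVGet v (x + d'.1) (y + d'.2)) with h | h
          · exact h
          · exact absurd ((pvGuard_iff maze v _ _).mpr ⟨ho', h⟩) hg
        obtain ⟨hnx, _, hny, _, _⟩ := (pvOpen_iff maze _ _).mp ho'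
        exact hsub2 _ ⟨hnx, hny, hget⟩
      · exact hcov2 d' hd' ho'

theorem pvDfsK (maze : List (List String)) : ∀ f : Nat, pvDfsStmtK maze f := by
  intro f
  induction f with
  | zero =>
    intro x y v G _ _ _ _ hf _
    omega
  | succ f ih =>
    intro x y v G hs hnb hinv ho hf hfalse
    rw [pvDfs_succ] at hfalse ⊢
    by_cases hx1 : x = (maze.length : Int) - 1
    · rw [if_pos hx1] at hfalse; simp at hfalse
    · rw [if_neg hx1] at hfalse ⊢
      obtain ⟨hnx, _, hny, _, _⟩ := (pvOpen_iff maze x y).mp ho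
      obtain ⟨hbx, hby⟩ := pvShape_bounds maze v x y hs ho
      have hs1 : pvShape maze (pvVSet v x y) := pvShape_vset maze v x y hs
      have hsub0 : pvSub v (pvVSet v x y) := pvSub_vset v x y hnx hny
      have hVxy : pvV (pvVSet v x y) (x, y) := pvV_vset_self v x y hnx hny hbx hby
      have hnb1 : pvNB maze (pvVSet v x y) := by
        intro p hp
        rcases (pvV_vset_iff v x y hnx hny hbx hby p).mp hp with hv | rfl
        · exact hnb p hv
        · exact ⟨ho, hx1⟩
      have hinv1 : pvInv maze (pvVSet v x y) (fun c => G c ∨ c = (x, y)) := by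
        intro p hp hGp q hrq
        have hpe : p ≠ (x, y) := fun h => hGp (Or.inr h)
        have hpv : pvV v p := by
          rcases (pvV_vset_iff v x y hnx hny hbx hby p).mp hp with hv | h
          · exact hv
          · exact absurd h hpe
        have hrq' : pvReach maze (fun c => pvV v c ∨ G c) p q := by
          refine pvReach_anti ?_ hrq
          rintro c (hc | hc)
          · exact Or.inl (hsub0 c hc)
          · exact Or.inr (Or.inl hc)
        exact hinv p hpv (fun h => hGp (Or.inl h)) q hrq'
      have hloop := pvDfsLoopK maze f ih (pvDx.zip pvDy) x y (pvVSet v x y) G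
        (pvCF (pvVSet v x y)) hs1 hnb1 hinv1 (le_refl _) (by omega) hfalse
      obtain ⟨hs2, hnb2, hsub2, hcf2, hinv2, hcov2⟩ := hloop
      set w := (pvDfsLoop maze f (pvDx.zip pvDy) x y (pvVSet v x y)).2 with hw
      have hVw : pvV w (x, y) := hsub2 _ hVxy
      refine ⟨hs2, hnb2, pvSub_trans hsub0 hsub2, hcf2, hVw, ?_⟩
      intro p hp hGp q hrq
      by_cases hpxy : p = (x, y)
      · subst hpxy
        have key : ∀ q', pvReach maze (fun c => pvV w c ∨ G c) (x, y) q' → q' = (x, y) := by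
          intro q' hq'
          induction hq' with
          | refl => rfl
          | @step q1 r1 h hnbr hopen hA ih2 =>
            exfalso
            have hnbr' : r1 ∈ (pvDx.zip pvDy).map (fun d => (x + d.1, y + d.2)) := by
              rw [pvNbrs_eq_map x y]
              simpa [ih2] using hnbr
            obtain ⟨d, hd, hdr⟩ := List.mem_map.mp hnbr'
            have h1 : x + d.1 = r1.1 := by rw [← hdr]
            have h2 : y + d.2 = r1.2 := by rw [← hdr]
            have hcv := hcov2 d hd (by rw [h1, h2]; exact hopen)
            rw [hdr] at hcv
            exact hA (Or.inl hcv)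
        rw [key q hrq]
        exact hx1
      · have hrq' : pvReach maze (fun c => pvV w c ∨ (G c ∨ c = (x, y))) p q := by
          refine pvReach_anti ?_ hrq
          rintro c (hc | (hc | rfl))
          · exact Or.inl hc
          · exact Or.inr hc
          · exact Or.inl hVw
        exact hinv2 p hp (by rintro (h | h); exact hGp h; exact hpxy h) q hrq'

/-- soundness: a `true` answer exhibits a path to the bottom row. -/
def pvDfsStmtS (maze : List (List String)) (f : Nat) : Prop :=
  ∀ x y v, (pvDfs maze f x y v).1 = true →
    ∃ q, pvReach maze (fun _ => False) (x, y) q ∧ q.1 = (maze.length : Int) - 1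

theorem pvDfsLoopS (maze : List (List String)) (f : Nat) (hS : pvDfsStmtS maze f) :
    ∀ (ds : List (Int × Int)) (x y : Int) (v : List (List Bool)),
      (∀ d ∈ ds, (x + d.1, y + d.2) ∈ pvNbrs x y) →
      (pvDfsLoop maze f ds x y v).1 = true →
      ∃ q, pvReach maze (fun _ => False) (x, y) q ∧ q.1 = (maze.length : Int) - 1 := by
  intro ds
  induction ds with
  | nil =>
    intro x y v _ htrue
    rw [pvDfsLoop_nil] at htrue
    simp at htrue
  | cons d ds ih =>
    intro x y v hds htrue
    rw [pvDfsLoop_cons] at htrue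
    by_cases hg : pvGuard maze v (x + d.1) (y + d.2) = true
    · rw [if_pos hg] at htrue
      obtain ⟨ho, _⟩ := (pvGuard_iff maze v _ _).mp hg
      by_cases hb1 : (pvDfs maze f (x + d.1) (y + d.2) v).1 = true
      · obtain ⟨q, hq1, hq2⟩ := hS (x + d.1) (y + d.2) v hb1
        refine ⟨q, ?_, hq2⟩
        have hstep : pvReach maze (fun _ => False) (x, y) (x + d.1, y + d.2) :=
          pvReach.step (pvReach.refl (x, y)) (hds d List.mem_cons_self) ho (fun h => h)
        exact pvReach_trans hstep hq1
      · rw [if_neg hb1] at htrue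
        exact ih x y _ (fun d' hd' => hds d' (List.mem_cons_of_mem _ hd')) htrue
    · rw [if_neg hg] at htrue
      exact ih x y v (fun d' hd' => hds d' (List.mem_cons_of_mem _ hd')) htrue

theorem pvDfsS (maze : List (List String)) : ∀ f : Nat, pvDfsStmtS maze f := by
  intro f
  induction f with
  | zero =>
    intro x y v htrue
    rw [pvDfs_zero] at htrue
    simp at htrue
  | succ f ih =>
    intro x y v htrue
    rw [pvDfs_succ] at htrue
    by_cases hx1 : x = (maze.length : Int) - 1
    · exact ⟨(x, y), pvReach.refl _, hx1⟩
    · rw [if_neg hx1] at htrue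
      refine pvDfsLoopS maze f ih (pvDx.zip pvDy) x y (pvVSet v x y) ?_ htrue
      intro d hd
      rw [← pvNbrs_eq_map x y]
      exact List.mem_map.mpr ⟨d, hd, rfl⟩

theorem pvCanExitLoop_values (maze : List (List String)) (f : Nat) :
    ∀ (ys : List Int) (v : List (List Bool)),
      pvCanExitLoop maze f ys v = 1 ∨ pvCanExitLoop maze f ys v = -1 := by
  intro ys
  induction ys with
  | nil => intro v; right; rfl
  | cons y ys ih =>
    intro v
    by_cases hc : (pvCell maze 0 y == "0") = true
    · cases hb : (pvDfs maze f 0 y v).1 with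
      | false =>
        have hr : pvCanExitLoop maze f (y :: ys) v =
            pvCanExitLoop maze f ys (pvDfs maze f 0 y v).2 := by
          simp [pvCanExitLoop, hc, hb]
        rw [hr]; exact ih _
      | true =>
        left
        simp [pvCanExitLoop, hc, hb]
    · have hr : pvCanExitLoop maze f (y :: ys) v = pvCanExitLoop maze f ys v := by
        simp [pvCanExitLoop, hc]
      rw [hr]; exact ih v

theorem pvTopA (maze : List (List String)) (hmz : maze ≠ []) (C0 : Nat) :
    ∀ (ys : List Int) (v : List (List Bool)), pvShape maze v → pvNB maze v →
      pvInv maze v (fun _ => False) → pvCF v ≤ C0 →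
      (∀ y ∈ ys, 0 ≤ y ∧ y < ((pvRow maze 0).length : Int)) →
      (pvCanExitLoop maze (C0 + 1) ys v = 1 → pvHasPath maze) ∧
      (pvCanExitLoop maze (C0 + 1) ys v = -1 →
        (∀ y : Int, 0 ≤ y → y < ((pvRow maze 0).length : Int) →
          pvCell maze 0 y = "0" → y ∈ ys ∨ pvV v (0, y)) →
        ¬ pvHasPath maze) := by
  intro ys
  induction ys with
  | nil =>
    intro v hs hnb hinv hcf hys
    constructor
    · intro h1
      simp [pvCanExitLoop] at h1
    · intro _ hM hHas
      obtain ⟨q, ⟨y0, hopen, hreach⟩, hq⟩ := hHas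
      obtain ⟨_, _, hy0, hylt, hcell⟩ := (pvOpen_iff maze 0 y0).mp hopen
      have hV : pvV v (0, y0) := by
        rcases hM y0 hy0 hylt hcell with h | h
        · simp at h
        · exact h
      exact pvBlocked hinv hnb hV hreach hq
  | cons y ys ih =>
    intro v hs hnb hinv hcf hys
    have hy := hys y (by simp)
    by_cases hc : pvCell maze 0 y = "0"
    · have hcb : (pvCell maze 0 y == "0") = true := by simp [hc]
      have hn0 : (0 : Int) < (maze.length : Int) := by
        have h0 : maze.length ≠ 0 := fun h => hmz (List.eq_nil_of_length_eq_zero h)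
        omega
      have hopen : pvOpen maze 0 y = true :=
        (pvOpen_iff maze 0 y).mpr ⟨le_refl 0, hn0, hy.1, hy.2, hc⟩
      cases hb : (pvDfs maze (C0 + 1) 0 y v).1 with
      | true =>
        have hres : pvCanExitLoop maze (C0 + 1) (y :: ys) v = 1 := by
          simp [pvCanExitLoop, hcb, hb]
        constructor
        · intro _
          obtain ⟨q, hq1, hq2⟩ := pvDfsS maze (C0 + 1) 0 y v hb
          exact ⟨q, ⟨y, hopen, hq1⟩, hq2⟩
        · intro h1 _
          rw [hres] at h1
          norm_num at h1
      | false =>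
        have hcfv : pvCF (pvVSet v 0 y) + 1 ≤ C0 + 1 := by
          have := pvCF_vset_le v 0 y
          omega
        have hK := pvDfsK maze (C0 + 1) 0 y v (fun _ => False) hs hnb hinv hopen hcfv hb
        obtain ⟨hs1, hnb1, hsub1, hcf1, hV1, hinv1⟩ := hK
        have hcf1' : pvCF (pvDfs maze (C0 + 1) 0 y v).2 ≤ C0 := by
          have := pvCF_vset_le v 0 y
          omega
        have hres : pvCanExitLoop maze (C0 + 1) (y :: ys) v =
            pvCanExitLoop maze (C0 + 1) ys (pvDfs maze (C0 + 1) 0 y v).2 := by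
          simp [pvCanExitLoop, hcb, hb]
        have ihr := ih (pvDfs maze (C0 + 1) 0 y v).2 hs1 hnb1 hinv1 hcf1'
          (fun y' hy' => hys y' (by simp [hy']))
        constructor
        · intro h1
          rw [hres] at h1
          exact ihr.1 h1
        · intro h1 hM
          rw [hres] at h1
          refine ihr.2 h1 ?_
          intro y' h1' h2' h3'
          rcases hM y' h1' h2' h3' with hmem | hv
          · rcases List.mem_cons.mp hmem with rfl | hmem'
            · exact Or.inr hV1
            · exact Or.inl hmem'
          · exact Or.inr (hsub1 _ hv)
    · have hcb : (pvCell maze 0 y == "0") ≠ true := by simp [hc]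
      have hres : pvCanExitLoop maze (C0 + 1) (y :: ys) v =
          pvCanExitLoop maze (C0 + 1) ys v := by
        simp [pvCanExitLoop, hcb]
      have ihr := ih v hs hnb hinv hcf (fun y' hy' => hys y' (by simp [hy']))
      constructor
      · intro h1
        rw [hres] at h1
        exact ihr.1 h1
      · intro h1 hM
        rw [hres] at h1
        refine ihr.2 h1 ?_
        intro y' h1' h2' h3'
        rcases hM y' h1' h2' h3' with hmem | hv
        · rcases List.mem_cons.mp hmem with rfl | hmem'
          · exact absurd h3' hc
          · exact Or.inl hmem'
        · exact Or.inr hv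

theorem pvA_char (maze : List (List String)) (hmz : maze ≠ []) :
    (can_exit maze = 1 ↔ pvHasPath maze) ∧ (can_exit maze = 1 ∨ can_exit maze = -1) := by
  set v0 := maze.map fun row => List.replicate row.length false with hv0
  have hA : can_exit maze = pvCanExitLoop maze (pvCF v0 + 1)
      (PySem.List.pyRange 0 (((pvRow maze 0).length : Int)) 1) v0 := by
    rw [hv0]
    rfl
  have hget0 : ∀ p : Int × Int, ¬ pvV v0 p := by
    rintro p ⟨_, _, hg⟩
    rw [hv0, pvVGet_init] at hg
    simp at hg
  have htop := pvTopA maze hmz (pvCF v0)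
    (PySem.List.pyRange 0 (((pvRow maze 0).length : Int)) 1) v0
    (by rw [hv0]; exact pvShape_init maze)
    (fun p hp => absurd hp (hget0 p))
    (fun p hp => absurd hp (hget0 p))
    (le_refl _)
    (fun y hy => PySem.List.mem_pyRange_one.mp hy)
  have hvals := pvCanExitLoop_values maze (pvCF v0 + 1)
    (PySem.List.pyRange 0 (((pvRow maze 0).length : Int)) 1) v0
  constructor
  · constructor
    · intro h1
      rw [hA] at h1
      exact htop.1 h1
    · intro hp
      rcases hvals with h | h
      · rw [hA]; exact h
      · exfalso
        exact htop.2 h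
          (fun y h1 h2 h3 => Or.inl (PySem.List.mem_pyRange_one.mpr ⟨h1, h2⟩)) hp
  · rw [hA]; exact hvals

-- ---- BFS (port B) lemmas ----

theorem pvExpandK (maze : List (List String)) :
    ∀ (ps : List (Int × Int)) (v : List (List Bool)) (q : List (Int × Int)),
      pvShape maze v →
      pvShape maze (pvExpand maze ps v q).1 ∧ pvSub v (pvExpand maze ps v q).1 ∧
      pvCF (pvExpand maze ps v q).1 + (pvExpand maze ps v q).2.length = pvCF v + q.length ∧
      (∃ t, (pvExpand maze ps v q).2 = q ++ t) ∧
      (∀ p, pvV (pvExpand maze ps v q).1 p →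
        pvV v p ∨ (p ∈ ps ∧ pvOpen maze p.1 p.2 = true)) ∧
      (∀ p ∈ ps, pvOpen maze p.1 p.2 = true → pvV (pvExpand maze ps v q).1 p) ∧
      (∀ p, pvV (pvExpand maze ps v q).1 p → pvV v p ∨ p ∈ (pvExpand maze ps v q).2) ∧
      (∀ p ∈ (pvExpand maze ps v q).2,
        p ∈ q ∨ (p ∈ ps ∧ pvOpen maze p.1 p.2 = true ∧ pvV (pvExpand maze ps v q).1 p)) := by
  intro ps
  induction ps with
  | nil =>
    intro v q hs
    exact ⟨hs, pvSub_refl v, rfl, ⟨[], by simp [pvExpand]⟩, fun p hp => Or.inl hp,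
      fun p hp => absurd hp (by simp), fun p hp => Or.inl hp, fun p hp => Or.inl hp⟩
  | cons p0 ps ih =>
    intro v q hs
    simp only [pvExpand]
    by_cases hg : pvGuard maze v p0.1 p0.2 = true
    · rw [if_pos hg]
      obtain ⟨ho, hu⟩ := (pvGuard_iff maze v _ _).mp hg
      obtain ⟨hnx, _, hny, _, _⟩ := (pvOpen_iff maze _ _).mp ho
      obtain ⟨hbx, hby⟩ := pvShape_bounds maze v _ _ hs ho
      have hs1 := pvShape_vset maze v p0.1 p0.2 hs
      have hsub1 := pvSub_vset v p0.1 p0.2 hnx hny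
      have hvp0 : pvV (pvVSet v p0.1 p0.2) p0 := by
        have h := pvV_vset_self v p0.1 p0.2 hnx hny hbx hby
        simpa using h
      obtain ⟨hs2, hsub2, hcf2, hq2, hE4, hE5, hE7, hE6⟩ :=
        ih (pvVSet v p0.1 p0.2) (q ++ [p0]) hs1
      have hcfe : pvCF (pvVSet v p0.1 p0.2) + 1 = pvCF v :=
        pvCF_vset_eq v _ _ hnx hny hbx hby hu
      refine ⟨hs2, pvSub_trans hsub1 hsub2, ?_, ?_, ?_, ?_, ?_, ?_⟩
      · simp only [List.length_append, List.length_cons, List.length_nil] at hcf2 ⊢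
        omega
      · obtain ⟨t, ht⟩ := hq2
        exact ⟨p0 :: t, by simp [ht]⟩
      · intro p hp
        rcases hE4 p hp with hv1 | ⟨hmem, hop⟩
        · rcases (pvV_vset_iff v p0.1 p0.2 hnx hny hbx hby p).mp hv1 with hv | he
          · exact Or.inl hv
          · have hpp : p = p0 := he.trans Prod.mk.eta
            exact Or.inr ⟨by simp [hpp], by rw [hpp]; exact ho⟩
        · exact Or.inr ⟨List.mem_cons_of_mem _ hmem, hop⟩
      · intro p hp hop
        rcases List.mem_cons.mp hp with rfl | hmem
        · exact hsub2 _ hvp0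
        · exact hE5 p hmem hop
      · intro p hp
        rcases hE7 p hp with hv1 | hmem
        · rcases (pvV_vset_iff v p0.1 p0.2 hnx hny hbx hby p).mp hv1 with hv | he
          · exact Or.inl hv
          · right
            obtain ⟨t, ht⟩ := hq2
            rw [ht]
            have hpp : p = p0 := he.trans Prod.mk.eta
            simp [hpp]
        · exact Or.inr hmem
      · intro p hp
        rcases hE6 p hp with hmem | ⟨hmem, hop, hv⟩
        · rcases List.mem_append.mp hmem with h | h
          · exact Or.inl h
          · right
            have hpp : p = p0 := by simpa using h
            exact ⟨by simp [hpp], by rw [hpp]; exact ho, by rw [hpp]; exact hsub2 _ hvp0⟩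
        · exact Or.inr ⟨List.mem_cons_of_mem _ hmem, hop, hv⟩
    · rw [if_neg hg]
      obtain ⟨hs2, hsub2, hcf2, hq2, hE4, hE5, hE7, hE6⟩ := ih v q hs
      refine ⟨hs2, hsub2, hcf2, hq2, ?_, ?_, hE7, ?_⟩
      · intro p hp
        rcases hE4 p hp with hv | ⟨hmem, hop⟩
        · exact Or.inl hv
        · exact Or.inr ⟨List.mem_cons_of_mem _ hmem, hop⟩
      · intro p hp hop
        rcases List.mem_cons.mp hp with rfl | hmem
        · have hget : pvVGet v p.1 p.2 = true := by
            rcases Bool.eq_false_or_eq_true (pvVGet v p.1 p.2) with h | h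
            · exact h
            · exact absurd ((pvGuard_iff maze v _ _).mpr ⟨hop, h⟩) hg
          obtain ⟨hnx, _, hny, _, _⟩ := (pvOpen_iff maze _ _).mp hop
          exact hsub2 _ ⟨hnx, hny, hget⟩
        · exact hE5 p hmem hop
      · intro p hp
        rcases hE6 p hp with hmem | ⟨hmem, hop, hv⟩
        · exact Or.inl hmem
        · exact Or.inr ⟨List.mem_cons_of_mem _ hmem, hop, hv⟩

theorem pvNoPath_of_closed (maze : List (List String)) (v : List (List Bool))
    (hI3 : ∀ p, pvV v p → p.1 ≠ (maze.length : Int) - 1 ∧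
      ∀ r ∈ pvNbrs p.1 p.2, pvOpen maze r.1 r.2 = true → pvV v r)
    (hI4 : ∀ y : Int, 0 ≤ y → y < ((pvRow maze 0).length : Int) → pvCell maze 0 y = "0" →
      pvV v (0, y)) :
    ¬ pvHasPath maze := by
  rintro ⟨qq, ⟨y0, hopen, hreach⟩, hq⟩
  obtain ⟨_, _, hy0, hylt, hcell⟩ := (pvOpen_iff maze 0 y0).mp hopen
  have hV0 := hI4 y0 hy0 hylt hcell
  have hVq := pvReach_in_V (fun p hp => (hI3 p hp).2) hreach hV0
  exact (hI3 qq hVq).1 hq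

theorem pvBfsK (maze : List (List String)) :
    ∀ (f : Nat) (q : List (Int × Int)) (v : List (List Bool)), pvShape maze v →
      pvCF v + q.length ≤ f →
      (∀ p ∈ q, pvV v p ∧ pvOpen maze p.1 p.2 = true ∧ pvReachTop maze p) →
      (∀ p, pvV v p → pvOpen maze p.1 p.2 = true ∧ pvReachTop maze p) →
      (∀ p, pvV v p → p ∉ q → p.1 ≠ (maze.length : Int) - 1 ∧
        ∀ r ∈ pvNbrs p.1 p.2, pvOpen maze r.1 r.2 = true → pvV v r) →
      (∀ y : Int, 0 ≤ y → y < ((pvRow maze 0).length : Int) → pvCell maze 0 y = "0" →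
        pvV v (0, y)) →
      (pvBfs maze f q v = 1 → pvHasPath maze) ∧
      (pvBfs maze f q v = -1 → ¬ pvHasPath maze) := by
  intro f
  induction f with
  | zero =>
    intro q v hs hf hI1 hI2 hI3 hI4
    cases q with
    | nil =>
      constructor
      · intro h
        simp [pvBfs] at h
      · intro _
        exact pvNoPath_of_closed maze v (fun p hp => hI3 p hp (by simp)) hI4
    | cons p rest =>
      simp only [List.length_cons] at hf
      omega
  | succ f ih =>
    intro q v hs hf hI1 hI2 hI3 hI4
    cases q with
    | nil =>
      constructor
      · intro h
        simp [pvBfs] at h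
      · intro _
        exact pvNoPath_of_closed maze v (fun p hp => hI3 p hp (by simp)) hI4
    | cons p rest =>
      by_cases hb : p.1 = (maze.length : Int) - 1
      · have hres : pvBfs maze (f + 1) (p :: rest) v = 1 := by
          simp [pvBfs, hb]
        constructor
        · intro _
          obtain ⟨_, _, hRT⟩ := hI1 p (by simp)
          exact ⟨p, hRT, hb⟩
        · intro h1
          rw [hres] at h1
          norm_num at h1
      · obtain ⟨hs1, hsub1, hcf1, _, hE4, hE5, hE7, hE6⟩ :=
          pvExpandK maze (pvNbrs p.1 p.2) v [] hs
        have hres : pvBfs maze (f + 1) (p :: rest) v =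
            pvBfs maze f (rest ++ (pvExpand maze (pvNbrs p.1 p.2) v []).2)
              (pvExpand maze (pvNbrs p.1 p.2) v []).1 := by
          simp [pvBfs, hb]
        obtain ⟨hVp, hOp, hRTp⟩ := hI1 p (by simp)
        have hE6' : ∀ p' ∈ (pvExpand maze (pvNbrs p.1 p.2) v []).2,
            p' ∈ pvNbrs p.1 p.2 ∧ pvOpen maze p'.1 p'.2 = true ∧
            pvV (pvExpand maze (pvNbrs p.1 p.2) v []).1 p' := by
          intro p' hp'
          rcases hE6 p' hp' with h | h
          · simp at h
          · exact h
        have hRTstep : ∀ p', p' ∈ pvNbrs p.1 p.2 → pvOpen maze p'.1 p'.2 = true →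
            pvReachTop maze p' := by
          intro p' hmem hop
          obtain ⟨y0, ho0, hr0⟩ := hRTp
          exact ⟨y0, ho0, pvReach.step hr0 hmem hop (fun h => h)⟩
        have hI1' : ∀ p' ∈ rest ++ (pvExpand maze (pvNbrs p.1 p.2) v []).2,
            pvV (pvExpand maze (pvNbrs p.1 p.2) v []).1 p' ∧
            pvOpen maze p'.1 p'.2 = true ∧ pvReachTop maze p' := by
          intro p' hp'
          rcases List.mem_append.mp hp' with h | h
          · obtain ⟨a, b, c⟩ := hI1 p' (by simp [h])
            exact ⟨hsub1 _ a, b, c⟩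
          · obtain ⟨hmem, hop, hv⟩ := hE6' p' h
            exact ⟨hv, hop, hRTstep p' hmem hop⟩
        have hI2' : ∀ p', pvV (pvExpand maze (pvNbrs p.1 p.2) v []).1 p' →
            pvOpen maze p'.1 p'.2 = true ∧ pvReachTop maze p' := by
          intro p' hp'
          rcases hE4 p' hp' with h | ⟨hmem, hop⟩
          · exact hI2 p' h
          · exact ⟨hop, hRTstep p' hmem hop⟩
        have hI3' : ∀ p', pvV (pvExpand maze (pvNbrs p.1 p.2) v []).1 p' →
            p' ∉ rest ++ (pvExpand maze (pvNbrs p.1 p.2) v []).2 →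
            p'.1 ≠ (maze.length : Int) - 1 ∧
            ∀ r' ∈ pvNbrs p'.1 p'.2, pvOpen maze r'.1 r'.2 = true →
              pvV (pvExpand maze (pvNbrs p.1 p.2) v []).1 r' := by
          intro p' hp' hnin
          by_cases hpp : p' = p
          · subst hpp
            exact ⟨hb, fun r' hr' ho' => hE5 r' hr' ho'⟩
          · by_cases hv : pvV v p'
            · have hnin2 : p' ∉ (p :: rest) := by
                intro h
                rcases List.mem_cons.mp h with h | h
                · exact hpp h
                · exact hnin (List.mem_append.mpr (Or.inl h))
              obtain ⟨h1, h2⟩ := hI3 p' hv hnin2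
              exact ⟨h1, fun r' hr' ho' => hsub1 _ (h2 r' hr' ho')⟩
            · rcases hE7 p' hp' with h | h
              · exact absurd h hv
              · exact absurd (List.mem_append.mpr (Or.inr h)) hnin
        have hI4' : ∀ y : Int, 0 ≤ y → y < ((pvRow maze 0).length : Int) →
            pvCell maze 0 y = "0" → pvV (pvExpand maze (pvNbrs p.1 p.2) v []).1 (0, y) :=
          fun y a b c => hsub1 _ (hI4 y a b c)
        have hf' : pvCF (pvExpand maze (pvNbrs p.1 p.2) v []).1 +
            (rest ++ (pvExpand maze (pvNbrs p.1 p.2) v []).2).length ≤ f := by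
          simp only [List.length_append, List.length_cons, List.length_nil] at hcf1 hf ⊢
          omega
        have hrec := ih (rest ++ (pvExpand maze (pvNbrs p.1 p.2) v []).2)
          (pvExpand maze (pvNbrs p.1 p.2) v []).1 hs1 hf' hI1' hI2' hI3' hI4'
        rw [hres]
        exact hrec

theorem pvBfs_values (maze : List (List String)) :
    ∀ (f : Nat) (q : List (Int × Int)) (v : List (List Bool)),
      pvBfs maze f q v = 1 ∨ pvBfs maze f q v = -1 := by
  intro f
  induction f with
  | zero =>
    intro q v
    cases q <;> simp [pvBfs]
  | succ f ih =>
    intro q v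
    cases q with
    | nil => simp [pvBfs]
    | cons p rest =>
      by_cases hb : p.1 = (maze.length : Int) - 1
      · left
        simp [pvBfs, hb]
      · have hres : pvBfs maze (f + 1) (p :: rest) v =
            pvBfs maze f (rest ++ (pvExpand maze (pvNbrs p.1 p.2) v []).2)
              (pvExpand maze (pvNbrs p.1 p.2) v []).1 := by
          simp [pvBfs, hb]
        rw [hres]
        exact ih _ _

theorem pvSeedK (maze : List (List String)) (hmz : maze ≠ []) :
    ∀ (ys : List Int) (v : List (List Bool)) (q : List (Int × Int)), pvShape maze v →
      (∀ p, pvV v p ↔ p ∈ q) →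
      (∀ p ∈ q, p.1 = 0 ∧ pvOpen maze p.1 p.2 = true) →
      (∀ y : Int, 0 ≤ y → y < ((pvRow maze 0).length : Int) → pvCell maze 0 y = "0" →
        y ∈ ys ∨ pvV v (0, y)) →
      (∀ y ∈ ys, 0 ≤ y ∧ y < ((pvRow maze 0).length : Int)) →
      pvShape maze (pvSeed maze ys v q).1 ∧
      (∀ p, pvV (pvSeed maze ys v q).1 p ↔ p ∈ (pvSeed maze ys v q).2) ∧
      (∀ p ∈ (pvSeed maze ys v q).2, p.1 = 0 ∧ pvOpen maze p.1 p.2 = true) ∧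
      (∀ y : Int, 0 ≤ y → y < ((pvRow maze 0).length : Int) → pvCell maze 0 y = "0" →
        pvV (pvSeed maze ys v q).1 (0, y)) := by
  intro ys
  induction ys with
  | nil =>
    intro v q hs hU hQ hM hY
    simp only [pvSeed]
    refine ⟨hs, hU, hQ, ?_⟩
    intro y h1 h2 h3
    rcases hM y h1 h2 h3 with h | h
    · simp at h
    · exact h
  | cons y ys ih =>
    intro v q hs hU hQ hM hY
    have hy := hY y (by simp)
    simp only [pvSeed]
    by_cases hc : pvCell maze 0 y = "0"
    · rw [if_pos (by simp [hc])]
      have hn0 : (0 : Int) < (maze.length : Int) := by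
        have h0 : maze.length ≠ 0 := fun h => hmz (List.eq_nil_of_length_eq_zero h)
        omega
      have hopen : pvOpen maze 0 y = true :=
        (pvOpen_iff maze 0 y).mpr ⟨le_refl 0, hn0, hy.1, hy.2, hc⟩
      obtain ⟨hbx, hby⟩ := pvShape_bounds maze v 0 y hs hopen
      have h00 : (0 : Int) ≤ 0 := le_refl 0
      have hU1 : ∀ p, pvV (pvVSet v 0 y) p ↔ p ∈ q ++ [(0, y)] := by
        intro p
        rw [pvV_vset_iff v 0 y h00 hy.1 hbx hby p]
        constructor
        · rintro (h | rfl)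
          · exact List.mem_append.mpr (Or.inl ((hU p).mp h))
          · simp
        · intro h
          rcases List.mem_append.mp h with h | h
          · exact Or.inl ((hU p).mpr h)
          · simp at h
            exact Or.inr h
      have hQ1 : ∀ p ∈ q ++ [(0, y)], p.1 = 0 ∧ pvOpen maze p.1 p.2 = true := by
        intro p hp
        rcases List.mem_append.mp hp with h | h
        · exact hQ p h
        · simp at h
          subst h
          exact ⟨rfl, hopen⟩
      have hM1 : ∀ y' : Int, 0 ≤ y' → y' < ((pvRow maze 0).length : Int) →
          pvCell maze 0 y' = "0" → y' ∈ ys ∨ pvV (pvVSet v 0 y) (0, y') := by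
        intro y' h1 h2 h3
        rcases hM y' h1 h2 h3 with h | h
        · rcases List.mem_cons.mp h with rfl | h
          · exact Or.inr (pvV_vset_self v 0 y' h00 h1 hbx hby)
          · exact Or.inl h
        · exact Or.inr (pvSub_vset v 0 y h00 hy.1 _ h)
      exact ih (pvVSet v 0 y) (q ++ [(0, y)]) (pvShape_vset maze v 0 y hs) hU1 hQ1 hM1
        (fun y' h => hY y' (by simp [h]))
    · rw [if_neg (by simp [hc])]
      have hM1 : ∀ y' : Int, 0 ≤ y' → y' < ((pvRow maze 0).length : Int) →
          pvCell maze 0 y' = "0" → y' ∈ ys ∨ pvV v (0, y') := by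
        intro y' h1 h2 h3
        rcases hM y' h1 h2 h3 with h | h
        · rcases List.mem_cons.mp h with rfl | h
          · exact absurd h3 hc
          · exact Or.inl h
        · exact Or.inr h
      exact ih v q hs hU hQ hM1 (fun y' h => hY y' (by simp [h]))

theorem pvB_char (maze : List (List String)) (hmz : maze ≠ []) :
    (can_exit_alt maze = 1 ↔ pvHasPath maze) ∧
    (can_exit_alt maze = 1 ∨ can_exit_alt maze = -1) := by
  set v0 := maze.map fun row => List.replicate row.length false with hv0
  have hB : can_exit_alt maze = pvBfs maze
      (pvCF (pvSeed maze (PySem.List.pyRange 0 (((pvRow maze 0).length : Int)) 1) v0 []).1 +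
        (pvSeed maze (PySem.List.pyRange 0 (((pvRow maze 0).length : Int)) 1) v0 []).2.length + 1)
      (pvSeed maze (PySem.List.pyRange 0 (((pvRow maze 0).length : Int)) 1) v0 []).2
      (pvSeed maze (PySem.List.pyRange 0 (((pvRow maze 0).length : Int)) 1) v0 []).1 := by
    rw [hv0]
    rfl
  have hget0 : ∀ p : Int × Int, ¬ pvV v0 p := by
    rintro p ⟨_, _, hg⟩
    rw [hv0, pvVGet_init] at hg
    simp at hg
  obtain ⟨hs1, hU1, hQ1, hM1⟩ := pvSeedK maze hmz
    (PySem.List.pyRange 0 (((pvRow maze 0).length : Int)) 1) v0 []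
    (by rw [hv0]; exact pvShape_init maze)
    (fun p => iff_of_false (hget0 p) (by simp))
    (by simp)
    (fun y h1 h2 h3 => Or.inl (PySem.List.mem_pyRange_one.mpr ⟨h1, h2⟩))
    (fun y hy => PySem.List.mem_pyRange_one.mp hy)
  set s := pvSeed maze (PySem.List.pyRange 0 (((pvRow maze 0).length : Int)) 1) v0 [] with hsdef
  have hRT : ∀ p, p ∈ s.2 → pvReachTop maze p := by
    intro p hp
    obtain ⟨h01, hop⟩ := hQ1 p hp
    have hpe : p = (0, p.2) := by
      rw [← h01]
    refine ⟨p.2, ?_, ?_⟩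
    · rw [← h01]
      exact hop
    · rw [hpe]
      exact pvReach.refl _
  have hbfs := pvBfsK maze (pvCF s.1 + s.2.length + 1) s.2 s.1 hs1 (by omega)
    (fun p hp => ⟨(hU1 p).mpr hp, (hQ1 p hp).2, hRT p hp⟩)
    (fun p hp => ⟨(hQ1 p ((hU1 p).mp hp)).2, hRT p ((hU1 p).mp hp)⟩)
    (fun p hp hnin => absurd ((hU1 p).mp hp) hnin)
    hM1
  have hvals := pvBfs_values maze (pvCF s.1 + s.2.length + 1) s.2 s.1
  constructor
  · constructor
    · intro h1
      rw [hB] at h1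
      exact hbfs.1 h1
    · intro hp
      rcases hvals with h | h
      · rw [hB]; exact h
      · exact absurd hp (hbfs.2 h)
  · rw [hB]; exact hvals

-- ===== VERDICT (by name: the statement is the Claim_ definition above) =====
theorem can_exit_spec : Claim_equal_can_exit := by
  intro maze _ hpre
  unfold Spec_can_exit
  obtain ⟨ha1, ha2⟩ := pvA_char maze hpre
  obtain ⟨hb1, hb2⟩ := pvB_char maze hpre
  by_cases hp : pvHasPath maze
  · rw [ha1.mpr hp, hb1.mpr hp]
  · rcases ha2 with h | h <;> rcases hb2 with h' | h'
    · rw [h, h']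
    · exact absurd (ha1.mp h) hp
    · exact absurd (hb1.mp h') hp
    · rw [h, h']
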